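-- pv_equiv track=rewrite | github.com/iqbash1/hawaiidashboard | connectors/cdc_wisqars.py | _pick_rate_col
-- ===== SOURCE A (Python) =====
-- def _pick_rate_col(headers):
--     keys=[h.strip() for h in headers]; kl=[k.lower() for k in keys]
--     prefs=["age-adjusted ypll rate","age adjusted ypll rate","ypll rate age-adjusted","age-adjusted rate","age adjusted rate","ypll rate","rate"]
--     for p in prefs:
--         for i,h in enumerate(kl):
--             if p in h and "per" in h and "100" in h:
--                 return keys[i]
--     for i,h in enumerate(kl):
--         if "rate" in h: return keys[i]
--     return None
-- ===== SOURCE B (Python) =====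
-- def _pick_rate_col(headers):
--     keys = [h.strip() for h in headers]
--     kl = [k.lower() for k in keys]
--     prefs = ["age-adjusted ypll rate", "age adjusted ypll rate", "ypll rate age-adjusted",
--              "age-adjusted rate", "age adjusted rate", "ypll rate", "rate"]
--
--     def rank(h):
--         for j, p in enumerate(prefs):
--             if p in h and "per" in h and "100" in h:
--                 return j
--         return len(prefs)
--
--     best = None  # (rank, key); strict < keeps the earliest header on rank ties
--     for k, h in zip(keys, kl):
--         r = rank(h)
--         if best is None or r < best[0]:
--             best = (r, k)
--     if best is not None and best[0] < len(prefs):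
--         return best[1]
--     return next((k for k, h in zip(keys, kl) if "rate" in h), None)
-- ===== Notes on version B (the rewrite author's own statement) =====
-- stated objective: alternative
-- what changed: Replaces the nested prefs-by-headers scan (restarting over all headers for each preference) with a single pass over the headers that computes each header's best preference rank and keeps the first header with the minimal rank, then applies the same 'rate' fallback.
import Mathlib
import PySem

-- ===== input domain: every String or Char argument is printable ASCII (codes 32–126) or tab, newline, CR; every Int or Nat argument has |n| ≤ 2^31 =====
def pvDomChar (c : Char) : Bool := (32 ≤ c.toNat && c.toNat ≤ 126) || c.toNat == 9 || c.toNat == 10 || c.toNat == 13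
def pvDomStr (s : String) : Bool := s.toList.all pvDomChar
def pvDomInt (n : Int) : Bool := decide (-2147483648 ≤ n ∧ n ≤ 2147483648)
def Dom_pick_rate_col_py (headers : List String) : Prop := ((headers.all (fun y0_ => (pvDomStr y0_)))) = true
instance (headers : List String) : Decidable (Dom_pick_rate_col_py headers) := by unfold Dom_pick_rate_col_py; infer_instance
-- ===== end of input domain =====

-- B restructures A's nested preference-by-header scan into one pass over the headers
-- keeping the first header of minimal preference rank (objective: alternative decomposition).

-- ===== PORT A =====
-- the literal prefs list (4th line of A); shared by both ports as both Pythons spell it out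
def pvPrefs : List String :=
  ["age-adjusted ypll rate", "age adjusted ypll rate", "ypll rate age-adjusted",
   "age-adjusted rate", "age adjusted rate", "ypll rate", "rate"]

-- the guard `p in h and "per" in h and "100" in h` (identical text in both Pythons)
def pvCond (p h : String) : Bool :=
  PySem.Str.isIn p h && PySem.Str.isIn "per" h && PySem.Str.isIn "100" h

-- inner loop `for i,h in enumerate(kl): if …: return keys[i]`; keys and kl are parallel
-- lists of equal length, carried zipped so keys[i] is the first component — exact.
def pvInnerA (p : String) : List (String × String) → Option String
  | [] => none
  | (k, h) :: rest => if pvCond p h then some k else pvInnerA p rest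

-- outer loop `for p in prefs:` with the early return
def pvOuterA : List String → List (String × String) → Option String
  | [], _ => none
  | p :: ps, l =>
    match pvInnerA p l with
    | some k => some k
    | none => pvOuterA ps l

-- fallback loop `for i,h in enumerate(kl): if "rate" in h: return keys[i]`
def pvFallbackA : List (String × String) → Option String
  | [] => none
  | (k, h) :: rest => if PySem.Str.isIn "rate" h then some k else pvFallbackA rest

def pick_rate_col_py (headers : List String) : Option String :=
  let keys := headers.map PySem.Str.strip
  let kl := keys.map PySem.Str.lower
  match pvOuterA pvPrefs (keys.zip kl) with
  | some k => some k
  | none => pvFallbackA (keys.zip kl)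

-- ===== PORT B =====
-- `rank(h)`: first preference index whose guard matches, else len(prefs)
def pvRank : List String → String → Nat
  | [], _ => 0
  | p :: ps, h => if pvCond p h then 0 else pvRank ps h + 1

-- the single pass: `for k,h in zip(keys,kl): r = rank(h); if best is None or r < best[0]: best = (r,k)`
def pvBestLoop : List (String × String) → Option (Nat × String) → Option (Nat × String)
  | [], best => best
  | (k, h) :: rest, best =>
    let r := pvRank pvPrefs h
    pvBestLoop rest
      (match best with
       | none => some (r, k)
       | some (br, _) => if r < br then some (r, k) else best)

def pick_rate_col_py_alt (headers : List String) : Option String :=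
  let keys := headers.map PySem.Str.strip
  let kl := keys.map PySem.Str.lower
  match pvBestLoop (keys.zip kl) none with
  | some (r, k) =>
    if r < pvPrefs.length then some k
    else ((keys.zip kl).find? (fun kh => PySem.Str.isIn "rate" kh.2)).map Prod.fst
  | none => ((keys.zip kl).find? (fun kh => PySem.Str.isIn "rate" kh.2)).map Prod.fst

-- ===== PRECONDITION & SPEC =====
def Spec_pick_rate_col_py (headers : List String) (out : Option String) : Prop := out = pick_rate_col_py_alt headers
instance (headers : List String) (out : Option String) : Decidable (Spec_pick_rate_col_py headers out) := by unfold Spec_pick_rate_col_py; infer_instance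

-- ===== CLAIM (what is proved, stated in full; the proofs are below) =====
def Claim_equal_pick_rate_col_py : Prop := ∀ (headers : List String), Dom_pick_rate_col_py headers → Spec_pick_rate_col_py headers (pick_rate_col_py headers)

-- ===== LEMMAS AND PROOFS =====

-- minimal rank over a list of (key, lowered header) pairs, sentinel ps.length
def pvMinRank (ps : List String) : List (String × String) → Nat
  | [] => ps.length
  | kh :: rest => min (pvRank ps kh.2) (pvMinRank ps rest)

-- key of the first pair achieving the minimal rank ("" if the list is empty)
def pvFmk (ps : List String) : List (String × String) → String
  | [] => ""
  | (k, h) :: rest => if pvRank ps h ≤ pvMinRank ps rest then k else pvFmk ps rest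

theorem pvRank_le (ps : List String) (h : String) : pvRank ps h ≤ ps.length := by
  induction ps with
  | nil => simp [pvRank]
  | cons p ps ih =>
    simp only [pvRank, List.length_cons]
    split <;> omega

theorem pvMinRank_le (ps : List String) (l : List (String × String)) :
    pvMinRank ps l ≤ ps.length := by
  induction l with
  | nil => simp [pvMinRank]
  | cons kh rest ih => simp only [pvMinRank]; omega

theorem pvInnerA_none_iff (p : String) (l : List (String × String)) :
    pvInnerA p l = none ↔ ∀ kh ∈ l, pvCond p kh.2 = false := by
  induction l with
  | nil => simp [pvInnerA]
  | cons kh rest ih =>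
    obtain ⟨k, h⟩ := kh
    simp only [pvInnerA, List.mem_cons]
    by_cases hc : pvCond p h = true
    · simp [hc]
    · have hcf : pvCond p h = false := by simpa using hc
      simp only [hcf, Bool.false_eq_true, if_false]
      constructor
      · rintro hn kh' (rfl | hm)
        · exact hcf
        · exact (ih.1 hn) kh' hm
      · intro ha; exact ih.2 (fun kh' hm => ha kh' (Or.inr hm))

theorem pvMinRank_cons_pref (p : String) (ps : List String) (l : List (String × String))
    (hno : ∀ kh ∈ l, pvCond p kh.2 = false) :
    pvMinRank (p :: ps) l = pvMinRank ps l + 1 := by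
  induction l with
  | nil => simp [pvMinRank]
  | cons kh rest ih =>
    have h1 : pvCond p kh.2 = false := hno kh (List.mem_cons_self)
    have h2 := ih (fun kh' hm => hno kh' (List.mem_cons_of_mem _ hm))
    simp only [pvMinRank, pvRank, h1, Bool.false_eq_true, if_false, h2]
    omega

theorem pvMinRank_zero_of_hit (p : String) (ps : List String) (l : List (String × String))
    (kh : String × String) (hm : kh ∈ l) (hc : pvCond p kh.2 = true) :
    pvMinRank (p :: ps) l = 0 := by
  induction l with
  | nil => cases hm
  | cons kh' rest ih =>
    rcases List.mem_cons.1 hm with rfl | hm'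
    · simp [pvMinRank, pvRank, hc]
    · simp [pvMinRank, ih hm']

theorem pvInnerA_some_hit (p : String) (l : List (String × String)) (k : String)
    (hs : pvInnerA p l = some k) : ∃ kh ∈ l, pvCond p kh.2 = true := by
  induction l with
  | nil => simp [pvInnerA] at hs
  | cons kh rest ih =>
    obtain ⟨k', h⟩ := kh
    by_cases hc : pvCond p h = true
    · exact ⟨(k', h), List.mem_cons_self, hc⟩
    · simp only [pvInnerA, hc, Bool.false_eq_true, if_false] at hs
      · obtain ⟨kh', hm, hcc⟩ := ih hs
        exact ⟨kh', List.mem_cons_of_mem _ hm, hcc⟩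

theorem pvOuterA_nil (ps : List String) : pvOuterA ps [] = none := by
  induction ps with
  | nil => rfl
  | cons p ps ih => simp [pvOuterA, pvInnerA, ih]

theorem pvOuterA_cons (ps : List String) (x : String × String) (l : List (String × String)) :
    pvOuterA ps (x :: l) =
      if pvRank ps x.2 < ps.length ∧ pvRank ps x.2 ≤ pvMinRank ps l then some x.1
      else pvOuterA ps l := by
  induction ps with
  | nil => simp [pvOuterA, pvRank]
  | cons p ps ih =>
    obtain ⟨xk, xh⟩ := x
    by_cases hc : pvCond p xh = true
    · have : pvInnerA p ((xk, xh) :: l) = some xk := by simp [pvInnerA, hc]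
      simp [pvOuterA, this, pvRank, hc]
    · have hxr : pvRank (p :: ps) xh = pvRank ps xh + 1 := by simp [pvRank, hc]
      have hI : pvInnerA p ((xk, xh) :: l) = pvInnerA p l := by
        simp [pvInnerA, hc]
      cases hi : pvInnerA p l with
      | some k =>
        obtain ⟨kh, hm, hcc⟩ := pvInnerA_some_hit p l k hi
        have hz := pvMinRank_zero_of_hit p ps l kh hm hcc
        have hne : ¬ (pvRank (p :: ps) xh < (p :: ps).length ∧
            pvRank (p :: ps) xh ≤ pvMinRank (p :: ps) l) := by
          rw [hz, hxr]; omega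
        simp only [pvOuterA, hI, hi, hne, if_neg, not_false_iff]
      | none =>
        have hall := (pvInnerA_none_iff p l).1 hi
        have hmr := pvMinRank_cons_pref p ps l hall
        simp only [pvOuterA, hI, hi, ih, hmr, hxr, List.length_cons]
        by_cases hcnd : pvRank ps xh < ps.length ∧ pvRank ps xh ≤ pvMinRank ps l
        · rw [if_pos hcnd, if_pos (by omega)]
        · rw [if_neg hcnd, if_neg (by omega)]

theorem pvOuterA_eq_fmk (ps : List String) (l : List (String × String))
    (hlt : pvMinRank ps l < ps.length) :
    pvOuterA ps l = some (pvFmk ps l) := by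
  induction l with
  | nil => simp [pvMinRank] at hlt
  | cons x rest ih =>
    obtain ⟨xk, xh⟩ := x
    rw [pvOuterA_cons]
    simp only [pvMinRank] at hlt
    by_cases hle : pvRank ps xh ≤ pvMinRank ps rest
    · have : pvRank ps xh < ps.length := by omega
      rw [if_pos ⟨this, hle⟩]
      simp [pvFmk, hle]
    · have hmr : pvMinRank ps rest < ps.length := by omega
      rw [if_neg (fun hcu => hle (by simpa using hcu.2)), ih hmr]
      simp [pvFmk, hle]

theorem pvOuterA_eq_none (ps : List String) (l : List (String × String))
    (hge : ps.length ≤ pvMinRank ps l) :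
    pvOuterA ps l = none := by
  induction l with
  | nil => exact pvOuterA_nil ps
  | cons x rest ih =>
    simp only [pvMinRank] at hge
    have h1 := pvRank_le ps x.2
    have h2 := pvMinRank_le ps rest
    rw [pvOuterA_cons, if_neg (by omega)]
    exact ih (by omega)

theorem pvFallbackA_eq_find (l : List (String × String)) :
    pvFallbackA l = (l.find? (fun kh => PySem.Str.isIn "rate" kh.2)).map Prod.fst := by
  induction l with
  | nil => rfl
  | cons kh rest ih =>
    obtain ⟨k, h⟩ := kh
    cases hc : PySem.Chars.isIn ['r', 'a', 't', 'e'] h.toList <;>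
      simp [pvFallbackA, List.find?, hc, ih]

theorem pvBestLoop_some (l : List (String × String)) (br : Nat) (bk : String)
    (hbr : br ≤ pvPrefs.length) :
    pvBestLoop l (some (br, bk)) =
      if pvMinRank pvPrefs l < br then some (pvMinRank pvPrefs l, pvFmk pvPrefs l)
      else some (br, bk) := by
  induction l generalizing br bk with
  | nil =>
    have := pvMinRank_le pvPrefs ([] : List (String × String))
    simp only [pvBestLoop, pvMinRank]
    rw [if_neg (by omega)]
  | cons kh rest ih =>
    obtain ⟨k, h⟩ := kh
    simp only [pvBestLoop, pvMinRank, pvFmk]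
    by_cases hlt : pvRank pvPrefs h < br
    · rw [if_pos hlt, ih _ _ (pvRank_le _ _)]
      by_cases h2 : pvMinRank pvPrefs rest < pvRank pvPrefs h
      · rw [if_pos h2, if_pos (by omega), if_neg (by omega)]
        congr 1; ext <;> simp <;> omega
      · rw [if_neg h2, if_pos (by omega), if_pos (by omega)]
        congr 2; omega
    · rw [if_neg hlt, ih _ _ hbr]
      by_cases h2 : pvMinRank pvPrefs rest < br
      · rw [if_pos h2, if_pos (by omega), if_neg (by omega)]
        congr 1; ext <;> simp <;> omega
      · rw [if_neg h2, if_neg (by omega)]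

theorem pvBestLoop_cons_none (x : String × String) (l : List (String × String)) :
    pvBestLoop (x :: l) none =
      some (pvMinRank pvPrefs (x :: l), pvFmk pvPrefs (x :: l)) := by
  obtain ⟨k, h⟩ := x
  simp only [pvBestLoop]
  rw [pvBestLoop_some l _ _ (pvRank_le _ _)]
  simp only [pvMinRank, pvFmk]
  by_cases h2 : pvMinRank pvPrefs l < pvRank pvPrefs h
  · rw [if_pos h2, if_neg (by omega)]
    congr 2; omega
  · rw [if_neg h2, if_pos (by omega)]
    congr 2; omega

theorem pv_main_gen (l : List (String × String)) :
    (match pvOuterA pvPrefs l with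
     | some k => some k
     | none => pvFallbackA l) =
    (match pvBestLoop l none with
     | some (r, k) =>
       if r < pvPrefs.length then some k
       else (l.find? (fun kh => PySem.Str.isIn "rate" kh.2)).map Prod.fst
     | none => (l.find? (fun kh => PySem.Str.isIn "rate" kh.2)).map Prod.fst) := by
  cases l with
  | nil => simp [pvOuterA_nil, pvBestLoop, pvFallbackA_eq_find]
  | cons x rest =>
    rw [pvBestLoop_cons_none]
    by_cases hlt : pvMinRank pvPrefs (x :: rest) < pvPrefs.length
    · rw [pvOuterA_eq_fmk _ _ hlt]
      simp [hlt]
    · rw [pvOuterA_eq_none _ _ (by omega)]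
      simp only [if_neg hlt]
      simp [pvFallbackA_eq_find]

theorem pick_rate_col_py_eq (headers : List String) :
    pick_rate_col_py headers = pick_rate_col_py_alt headers :=
  pv_main_gen (((headers.map PySem.Str.strip)).zip
    ((headers.map PySem.Str.strip).map PySem.Str.lower))

-- ===== VERDICT (by name: the statement is the Claim_ definition above) =====
theorem pick_rate_col_py_spec : Claim_equal_pick_rate_col_py := by
  intro headers _
  unfold Spec_pick_rate_col_py
  exact pick_rate_col_py_eq headers
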